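-- pv_equiv track=rewrite | github.com/liltims77/slack | string_sol.py | reverse_or_find_duplicates
-- ===== SOURCE A (Python) =====
-- def reverse_or_find_duplicates(s):
--     char_count = {}
--     duplicates = set()
--
--     # Count occurrences of each character
--     for char in s:
--         if char in char_count:
--             duplicates.add(char)
--         char_count[char] = char_count.get(char, 0) + 1
--
--     # If there are duplicates, return them; otherwise, reverse the string
--     if duplicates:
--         return ''.join(sorted(duplicates))
--     else:
--         reversed_string = ''
--         for i in range(len(s) - 1, -1, -1):  # Manually reversing the string
--             reversed_string += s[i]
--         return reversed_string
-- ===== SOURCE B (Python) =====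
-- def reverse_or_find_duplicates(s):
--     # One pass builds the full frequency table; a separate pass over the
--     # finished table collects the duplicated characters.
--     counts = {}
--     for ch in s:
--         counts[ch] = counts.get(ch, 0) + 1
--     dups = [ch for ch, n in counts.items() if n > 1]
--     if dups:
--         return ''.join(sorted(dups))
--     return s[::-1]
-- ===== Notes on version B (the rewrite author's own statement) =====
-- stated objective: simpler
-- what changed: B builds the frequency table alone in one pass and finds duplicates in a separate scan of the finished table (instead of membership tests interleaved with counting into an auxiliary set), and reverses via s[::-1] instead of a manual index loop.
import Mathlib
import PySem

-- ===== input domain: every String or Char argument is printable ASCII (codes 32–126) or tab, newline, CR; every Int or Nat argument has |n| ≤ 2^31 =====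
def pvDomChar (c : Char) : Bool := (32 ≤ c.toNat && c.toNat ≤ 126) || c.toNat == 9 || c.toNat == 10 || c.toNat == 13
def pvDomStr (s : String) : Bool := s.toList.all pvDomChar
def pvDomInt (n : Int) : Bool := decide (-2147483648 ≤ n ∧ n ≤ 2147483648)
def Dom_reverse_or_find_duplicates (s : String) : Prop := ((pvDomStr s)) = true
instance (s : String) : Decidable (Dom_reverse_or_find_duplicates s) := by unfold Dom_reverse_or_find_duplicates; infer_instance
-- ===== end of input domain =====

-- B detects duplicates by a separate scan of the finished frequency table and reverses with s[::-1];
-- A interleaves membership tests with counting into an auxiliary set and reverses by an index loop.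

-- ===== PORT A =====
def reverse_or_find_duplicates (s : String) : String :=
  let st := s.toList.foldl
    (fun (st : PySem.Dict Char Int × PySem.Set Char) c =>
      let dups := if st.1.contains c then PySem.Set.add st.2 c else st.2
      (st.1.insert c (st.1.getD c 0 + 1), dups))
    (PySem.Dict.empty, PySem.Set.empty)
  if st.2 ≠ [] then
    String.ofList (PySem.List.sorted st.2 (fun c => c) false)
  else
    String.ofList ((PySem.List.pyRange (PySem.List.len s.toList - 1) (-1) (-1)).foldl
      (fun acc i => acc ++ [PySem.List.pyGetD s.toList i ' ']) [])

-- ===== PORT B =====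
def reverse_or_find_duplicates_alt (s : String) : String :=
  let counts := s.toList.foldl (fun d c => PySem.Dict.insert d c (PySem.Dict.getD d c 0 + 1))
    (PySem.Dict.empty : PySem.Dict Char Int)
  let dups := (counts.items.filter (fun p => decide (1 < p.2))).map Prod.fst
  if dups ≠ [] then
    String.ofList (PySem.List.sorted dups (fun c => c) false)
  else
    (PySem.Str.slice? s none none (-1)).getD ""

-- ===== PRECONDITION & SPEC =====
def Spec_reverse_or_find_duplicates (s : String) (out : String) : Prop := out = reverse_or_find_duplicates_alt s
instance (s : String) (out : String) : Decidable (Spec_reverse_or_find_duplicates s out) := by unfold Spec_reverse_or_find_duplicates; infer_instance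

-- ===== CLAIM (what is proved, stated in full; the proofs are below) =====
def Claim_equal_reverse_or_find_duplicates : Prop := ∀ (s : String), Dom_reverse_or_find_duplicates s → Spec_reverse_or_find_duplicates s (reverse_or_find_duplicates s)

-- ===== LEMMAS AND PROOFS =====

-- membership in A's duplicate set
theorem foldA_snd_mem (l : List Char) (d : PySem.Dict Char Int) (S : PySem.Set Char) (c : Char) :
    (c ∈ (l.foldl (fun (st : PySem.Dict Char Int × PySem.Set Char) c =>
      let dups := if st.1.contains c then PySem.Set.add st.2 c else st.2
      (st.1.insert c (st.1.getD c 0 + 1), dups)) (d, S)).2)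
    ↔ (c ∈ S ∨ (c ∈ l ∧ (d.contains c = true ∨ 2 ≤ l.count c))) := by
  induction l generalizing d S with
  | nil => simp
  | cons x t ih =>
    simp only [List.foldl_cons]
    rw [ih]
    by_cases hcx : c = x
    · subst hcx
      by_cases hdc : d.contains c = true
      · simp [hdc, PySem.Set.mem_add]
      · simp [hdc]
    · have hb : (x == c) = false := by simp; exact fun h => hcx h.symm
      by_cases hdx : d.contains x = true
      · simp [hdx, PySem.Set.mem_add, hcx, PySem.Dict.contains_insert, Ne.symm hcx]
      · simp [hdx, hcx, PySem.Dict.contains_insert, Ne.symm hcx]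

theorem foldA_snd_nodup (l : List Char) (d : PySem.Dict Char Int) (S : PySem.Set Char)
    (hS : S.Nodup) :
    (l.foldl (fun (st : PySem.Dict Char Int × PySem.Set Char) c =>
      let dups := if st.1.contains c then PySem.Set.add st.2 c else st.2
      (st.1.insert c (st.1.getD c 0 + 1), dups)) (d, S)).2.Nodup := by
  induction l generalizing d S with
  | nil => exact hS
  | cons x t ih =>
    simp only [List.foldl_cons]
    apply ih
    by_cases hdx : d.contains x = true
    · simpa [hdx] using PySem.Set.nodup_add (s := S) (x := x) hS
    · simpa [hdx] using hS

-- B's duplicate list, in closed form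
theorem dupsB_eq (xs : List Char) :
    ((xs.foldl (fun d c => PySem.Dict.insert d c (PySem.Dict.getD d c 0 + 1))
        (PySem.Dict.empty : PySem.Dict Char Int)).items.filter (fun p => decide (1 < p.2))).map Prod.fst
    = (PySem.Set.ofList xs).filter (fun c => decide (1 < (xs.count c : Int))) := by
  have h : (xs.foldl (fun d c => PySem.Dict.insert d c (PySem.Dict.getD d c 0 + 1))
      (PySem.Dict.empty : PySem.Dict Char Int)) = PySem.Dict.counter xs := rfl
  rw [h, PySem.Dict.items_counter, List.filter_map, List.map_map]
  simp [Function.comp_def]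

-- ===== VERDICT (by name: the statement is the Claim_ definition above) =====
theorem reverse_or_find_duplicates_spec : Claim_equal_reverse_or_find_duplicates := by
  unfold Claim_equal_reverse_or_find_duplicates
  intro s _
  unfold Spec_reverse_or_find_duplicates reverse_or_find_duplicates reverse_or_find_duplicates_alt
  simp only []
  set xs := s.toList with hxs
  set A2 := (xs.foldl (fun (st : PySem.Dict Char Int × PySem.Set Char) c =>
      let dups := if st.1.contains c then PySem.Set.add st.2 c else st.2
      (st.1.insert c (st.1.getD c 0 + 1), dups)) (PySem.Dict.empty, PySem.Set.empty)).2 with hA2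
  set dupsB := (((xs.foldl (fun d c => PySem.Dict.insert d c (PySem.Dict.getD d c 0 + 1))
      (PySem.Dict.empty : PySem.Dict Char Int)).items.filter
      (fun p => decide (1 < p.2))).map Prod.fst) with hdupsB
  have hmem : ∀ c, c ∈ A2 ↔ c ∈ dupsB := by
    intro c
    rw [hA2, foldA_snd_mem, hdupsB, dupsB_eq]
    simp [PySem.Set.mem_ofList, List.mem_filter, PySem.Dict.contains_empty, PySem.Set.empty]
    intro _
    constructor
    · intro h; exact_mod_cast by omega
    · intro h; omega
  have hnodA : A2.Nodup := by
    rw [hA2]; exact foldA_snd_nodup _ _ _ (by simp [PySem.Set.empty])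
  have hnodB : dupsB.Nodup := by
    rw [hdupsB, dupsB_eq]; exact (PySem.Set.nodup_ofList xs).filter _
  have hperm : A2.Perm dupsB := (List.perm_ext_iff_of_nodup hnodA hnodB).2 hmem
  have hnil : A2 = [] ↔ dupsB = [] := by
    constructor <;> intro h <;> [exact (h ▸ hperm).nil_eq.symm; exact (h ▸ hperm).symm.nil_eq.symm]
  by_cases hA : A2 = []
  · have hB : dupsB = [] := hnil.mp hA
    simp only [hA, hB, ne_eq, not_true_eq_false, if_false]
    -- both else-branches are the reversed string
    rw [PySem.Str.slice?_none_none_neg_one, Option.getD_some]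
    have h0 : (-1 : Int) + 1 = 0 := by norm_num
    have h1 : PySem.List.len xs - 1 + 1 = PySem.List.len xs := by ring
    rw [PySem.List.pyRange_neg_one_eq_reverse, h0, h1, PySem.List.len_eq]
    rw [PySem.List.foldl_append_singleton_eq_map, List.map_reverse,
      PySem.List.map_pyGetD_pyRange_zero' xs ' ', List.nil_append]
  · have hB : dupsB ≠ [] := fun h => hA (hnil.mpr h)
    simp only [ne_eq, hA, hB, not_false_eq_true, if_true]
    congr 1
    exact PySem.List.sorted_eq_sorted_of_perm A2 dupsB (fun c => c) (fun a b h => h) hperm
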